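-- pv_equiv track=rewrite | github.com/saisandeshk/nanochat | bpe/simple_tokenizer.py | fast_merge_inplace_token_ids
-- ===== SOURCE A (Python) =====
-- def fast_merge_inplace_token_ids(ids, pair, idx):
--     """
--     In the list of integers (ids), replace all the concurrent occurences of pair, with the new
--     integer token idx in place.
--     """
--     # find all the positions where the pair occurs
--     i = 0
--     while i < len(ids) - 1:
--         if ids[i] == pair[0] and ids[i+1] == pair[1]:
--             ids[i] = idx
--             ids.pop(i+1)
--         else:
--             i += 1
--     return ids
-- ===== SOURCE B (Python) =====
-- def fast_merge_inplace_token_ids(ids, pair, idx):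
--     """
--     Single left-to-right pass: build the output list once, merging each
--     incoming token with the current top of the output when (top, token)
--     equals the pair; a merged token (idx) stays on top so chained merges
--     happen naturally. Returns a new list (the return value equals A's;
--     unlike A it does not mutate ids in place).
--     """
--     out = []
--     for t in ids:
--         if out and out[-1] == pair[0] and t == pair[1]:
--             out[-1] = idx
--         else:
--             out.append(t)
--     return out
-- ===== Notes on version B (the rewrite author's own statement) =====
-- stated objective: faster
-- what changed: Replaces A's in-place while-loop (which re-checks the same index after each merge and pays an O(n) list.pop per merge) by a single left-to-right pass that builds a new output list, merging each incoming token with the top of the output; equivalence is about the return value only (B does not mutate ids).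
import Mathlib
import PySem

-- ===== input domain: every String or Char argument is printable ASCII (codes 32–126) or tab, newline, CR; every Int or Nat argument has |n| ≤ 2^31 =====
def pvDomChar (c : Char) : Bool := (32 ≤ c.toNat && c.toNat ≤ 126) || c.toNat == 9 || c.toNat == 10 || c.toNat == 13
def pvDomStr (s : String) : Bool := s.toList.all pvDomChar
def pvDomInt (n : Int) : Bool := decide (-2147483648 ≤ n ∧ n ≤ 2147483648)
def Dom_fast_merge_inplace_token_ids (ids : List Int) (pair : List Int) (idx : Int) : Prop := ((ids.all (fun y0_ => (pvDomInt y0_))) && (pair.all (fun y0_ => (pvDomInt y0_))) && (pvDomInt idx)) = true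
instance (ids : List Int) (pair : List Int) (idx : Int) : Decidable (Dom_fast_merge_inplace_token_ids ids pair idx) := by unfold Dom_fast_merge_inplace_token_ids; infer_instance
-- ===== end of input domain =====

-- B replaces A's in-place scan (one O(n) pop per merge) by a single O(n) pass that
-- builds a new list, merging each token with the top of the output; equivalence is
-- about the RETURN value only (A mutates ids in place, B does not).

-- ===== PORT A =====
-- A's while loop: i stays put after a merge (set + pop), else advances.
def pvMergeLoopA (ids : List Int) (pair : List Int) (idx : Int) (i : Nat) : List Int :=
  if _h : i + 1 < ids.length then
    if ids.getD i 0 = pair.getD 0 0 ∧ ids.getD (i+1) 0 = pair.getD 1 0 then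
      pvMergeLoopA ((ids.set i idx).eraseIdx (i+1)) pair idx i
    else
      pvMergeLoopA ids pair idx (i+1)
  else ids
termination_by ids.length - i
decreasing_by
  · simp [List.length_eraseIdx, List.length_set, _h]; omega
  · omega

def fast_merge_inplace_token_ids (ids : List Int) (pair : List Int) (idx : Int) : List Int :=
  pvMergeLoopA ids pair idx 0

-- ===== PORT B =====
-- the body of B's for-loop: merge the incoming token with the top of out, or push it
def pvStepB (pair : List Int) (idx : Int) (out : List Int) (t : Int) : List Int :=
  if out ≠ [] ∧ out.getLast? = some (pair.getD 0 0) ∧ t = pair.getD 1 0 then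
    out.dropLast ++ [idx]
  else
    out ++ [t]

def fast_merge_inplace_token_ids_alt (ids : List Int) (pair : List Int) (idx : Int) : List Int :=
  ids.foldl (pvStepB pair idx) []

-- ===== PRECONDITION & SPEC =====
-- Pre_ excludes exactly the inputs where Python A raises IndexError (pair shorter than
-- 2 while pair[0]/pair[1] gets evaluated); A returns on every input satisfying Pre_.
def Pre_fast_merge_inplace_token_ids (ids : List Int) (pair : List Int) (_idx : Int) : Prop :=
  2 ≤ pair.length ∨ ids.length ≤ 1 ∨ (pair.length = 1 ∧ pair.headI ∉ ids.dropLast)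
instance (ids : List Int) (pair : List Int) (idx : Int) : Decidable (Pre_fast_merge_inplace_token_ids ids pair idx) := by unfold Pre_fast_merge_inplace_token_ids; infer_instance

def pvWitness_fast_merge_inplace_token_ids : List Int × List Int × Int := ([5, 1, 2, 1, 2, 2, 7], [1, 2], 9)

def Spec_fast_merge_inplace_token_ids (ids : List Int) (pair : List Int) (idx : Int) (out : List Int) : Prop := out = fast_merge_inplace_token_ids_alt ids pair idx
instance (ids : List Int) (pair : List Int) (idx : Int) (out : List Int) : Decidable (Spec_fast_merge_inplace_token_ids ids pair idx out) := by unfold Spec_fast_merge_inplace_token_ids; infer_instance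

-- ===== CLAIM (what is proved, stated in full; the proofs are below) =====
def Claim_equal_fast_merge_inplace_token_ids : Prop := ∀ (ids : List Int) (pair : List Int) (idx : Int), Dom_fast_merge_inplace_token_ids ids pair idx → Pre_fast_merge_inplace_token_ids ids pair idx → Spec_fast_merge_inplace_token_ids ids pair idx (fast_merge_inplace_token_ids ids pair idx)


-- ===== LEMMAS AND PROOFS =====

-- the last element of the (i+1)-prefix of l is l[i]
lemma pv_getLast?_take {l : List Int} {i : Nat} (h : i < l.length) :
    (l.take (i+1)).getLast? = some l[i] := by
  have ht : l.take (i+1) = l.take i ++ [l[i]] := by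
    rw [List.take_add_one]; simp [List.getElem?_eq_getElem h]
  rw [ht, List.getLast?_concat]

lemma pv_take_ne_nil {l : List Int} {i : Nat} (h : i < l.length) :
    l.take (i+1) ≠ [] := by
  simp [List.take_eq_nil_iff]
  intro hnil
  subst hnil; simp at h

lemma pv_dropLast_take {l : List Int} {i : Nat} (h : i < l.length) :
    (l.take (i+1)).dropLast = l.take i := by
  rw [List.dropLast_eq_take, List.take_take]
  congr 1
  simp [List.length_take]
  omega

-- the merged list's (i+1)-prefix and what remains after it
lemma pv_take_merge {l : List Int} {i : Nat} (idx : Int) (h : i+1 < l.length) :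
    ((l.set i idx).eraseIdx (i+1)).take (i+1) = l.take i ++ [idx] := by
  apply List.ext_getElem
  · simp [List.length_eraseIdx, List.length_take, h]; omega
  · intro n h1 h2
    simp [List.getElem_take, List.getElem_eraseIdx, List.getElem_set, List.getElem_append]
    simp [List.length_take, List.length_eraseIdx, h] at h1
    split_ifs with h3 h4 <;> simp_all <;> omega

lemma pv_drop_merge {l : List Int} {i : Nat} (idx : Int) (h : i+1 < l.length) :
    ((l.set i idx).eraseIdx (i+1)).drop (i+1) = l.drop (i+2) := by
  apply List.ext_getElem
  · simp [List.length_eraseIdx, h]; omega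
  · intro n h1 h2
    simp [List.getElem_drop, List.getElem_eraseIdx, List.getElem_set]
    split_ifs with h3 h4 <;> first | omega | (congr 1; omega)

-- A's loop from state (l, i) equals B's fold continued from accumulator l.take (i+1)
lemma pv_loop_eq_fold (pair : List Int) (idx : Int) :
    ∀ (l : List Int) (i : Nat),
      pvMergeLoopA l pair idx i = (l.drop (i+1)).foldl (pvStepB pair idx) (l.take (i+1)) := by
  intro l i
  induction l, i using pvMergeLoopA.induct pair idx with
  | case1 l i h hm ih =>
    have hi : i < l.length := by omega
    have hp0 : l[i] = pair.getD 0 0 := by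
      have := hm.1; rwa [List.getD_eq_getElem _ _ hi] at this
    have hp1 : l[i+1] = pair.getD 1 0 := by
      have := hm.2; rwa [List.getD_eq_getElem _ _ h] at this
    have hdrop : l.drop (i+1) = l[i+1] :: l.drop (i+2) :=
      List.drop_eq_getElem_cons h
    have hstep : pvStepB pair idx (l.take (i+1)) l[i+1] = l.take i ++ [idx] := by
      unfold pvStepB
      rw [if_pos ⟨pv_take_ne_nil hi, by rw [pv_getLast?_take hi, hp0], hp1⟩]
      rw [pv_dropLast_take hi]
    rw [pvMergeLoopA]; rw [dif_pos h, if_pos hm]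
    rw [ih, pv_take_merge idx h, pv_drop_merge idx h, hdrop, List.foldl_cons, hstep]
  | case2 l i h hm ih =>
    have hi : i < l.length := by omega
    have hdrop : l.drop (i+1) = l[i+1] :: l.drop (i+2) :=
      List.drop_eq_getElem_cons h
    have hstep : pvStepB pair idx (l.take (i+1)) l[i+1] = l.take (i+2) := by
      unfold pvStepB
      rw [if_neg]
      · conv_rhs => rw [show i+2 = (i+1)+1 from rfl, List.take_add_one, List.getElem?_eq_getElem h]
        rfl
      · rintro ⟨-, hlast, ht⟩
        rw [pv_getLast?_take hi, Option.some_inj] at hlast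
        exact hm ⟨by rwa [List.getD_eq_getElem _ _ hi], by rwa [List.getD_eq_getElem _ _ h]⟩
    rw [pvMergeLoopA]; rw [dif_pos h, if_neg hm]
    rw [ih, hdrop, List.foldl_cons, hstep]
  | case3 l i h =>
    rw [pvMergeLoopA]; rw [dif_neg h]
    rw [List.drop_eq_nil_of_le (by omega), List.take_of_length_le (by omega)]
    rfl

theorem pv_main (ids pair : List Int) (idx : Int) :
    fast_merge_inplace_token_ids ids pair idx = fast_merge_inplace_token_ids_alt ids pair idx := by
  cases ids with
  | nil =>
    unfold fast_merge_inplace_token_ids fast_merge_inplace_token_ids_alt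
    rw [pvMergeLoopA]; simp
  | cons a rest =>
    unfold fast_merge_inplace_token_ids fast_merge_inplace_token_ids_alt
    rw [pv_loop_eq_fold]
    simp [pvStepB]

-- ===== VERDICT (by name: the statement is the Claim_ definition above) =====
theorem fast_merge_inplace_token_ids_spec : Claim_equal_fast_merge_inplace_token_ids := by
  intro ids pair idx _ _
  unfold Spec_fast_merge_inplace_token_ids
  exact pv_main ids pair idx
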